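-- pv_equiv track=rewrite | github.com/zaheerbrakchan/cuttoffiq | app/services/sql_generator.py | _is_safe_select
-- ===== SOURCE A (Python) =====
-- def _is_safe_select(sql: str) -> bool:
--     lowered = sql.lower().strip()
--     if not lowered.startswith("select"):
--         return False
--
--     blocked = [
--         " insert ",
--         " update ",
--         " delete ",
--         " drop ",
--         " alter ",
--         " truncate ",
--         " create ",
--         " grant ",
--         " revoke ",
--         " execute ",
--         " call ",
--         ";",
--     ]
--     padded = f" {lowered} "
--     return all(token not in padded for token in blocked)
-- ===== SOURCE B (Python) =====
-- def _is_safe_select(sql: str) -> bool: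
--     lowered = sql.lower().strip()
--     if not lowered.startswith("select"):
--         return False
--     blocked = {"insert", "update", "delete", "drop", "alter", "truncate",
--                "create", "grant", "revoke", "execute", "call"}
--     word = []
--     for ch in lowered:
--         if ch == ';':
--             return False
--         if ch == ' ':
--             if ''.join(word) in blocked:
--                 return False
--             word = []
--         else:
--             word.append(ch)
--     return ''.join(word) not in blocked
-- ===== Notes on version B (the rewrite author's own statement) =====
-- stated objective: alternative
-- what changed: A pads the lowered string and runs one substring scan per blocked keyword (11 padded-keyword searches plus a semicolon search); B streams over the characters once, building the current space-delimited token in an accumulator and rejecting as soon as it sees a semicolon or completes a token that is in the blocked set.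
import Mathlib
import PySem

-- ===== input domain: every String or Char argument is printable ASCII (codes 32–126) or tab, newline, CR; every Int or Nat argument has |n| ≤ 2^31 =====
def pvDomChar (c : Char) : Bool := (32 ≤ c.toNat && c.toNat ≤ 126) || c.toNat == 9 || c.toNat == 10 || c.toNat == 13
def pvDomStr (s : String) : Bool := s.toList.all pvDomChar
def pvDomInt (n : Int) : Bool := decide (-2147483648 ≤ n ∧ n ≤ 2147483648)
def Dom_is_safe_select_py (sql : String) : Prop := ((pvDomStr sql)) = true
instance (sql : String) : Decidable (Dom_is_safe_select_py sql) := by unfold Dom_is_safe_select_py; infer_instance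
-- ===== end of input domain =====

-- B replaces A's per-keyword padded-substring scans by a single streaming pass that builds the
-- current space-delimited token in an accumulator and rejects on a semicolon or a blocked token (alternative).

-- ===== PORT A =====
def is_safe_select_py (sql : String) : Bool :=
  let lowered := PySem.Chars.strip (PySem.Chars.lower sql.toList)
  if !(PySem.Chars.startswith lowered ['s','e','l','e','c','t']) then false
  else
    let blocked : List (List Char) :=
      [ [' ','i','n','s','e','r','t',' '], [' ','u','p','d','a','t','e',' '],
        [' ','d','e','l','e','t','e',' '], [' ','d','r','o','p',' '],
        [' ','a','l','t','e','r',' '], [' ','t','r','u','n','c','a','t','e',' '],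
        [' ','c','r','e','a','t','e',' '], [' ','g','r','a','n','t',' '],
        [' ','r','e','v','o','k','e',' '], [' ','e','x','e','c','u','t','e',' '],
        [' ','c','a','l','l',' '], [';'] ]
    let padded := ' ' :: lowered ++ [' ']
    blocked.all (fun token => !(PySem.Chars.isIn token padded))

-- ===== PORT B =====
-- the Python set literal `blocked`
def pvBlockedB : PySem.Set (List Char) := PySem.Set.ofList
  [ ['i','n','s','e','r','t'], ['u','p','d','a','t','e'], ['d','e','l','e','t','e'],
    ['d','r','o','p'], ['a','l','t','e','r'], ['t','r','u','n','c','a','t','e'],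
    ['c','r','e','a','t','e'], ['g','r','a','n','t'], ['r','e','v','o','k','e'],
    ['e','x','e','c','u','t','e'], ['c','a','l','l'] ]

-- the `for ch in lowered` loop with its `word` accumulator and early returns
def pvScanB (word : List Char) : List Char → Bool
  | [] => !(pvBlockedB.contains word)
  | c :: rest =>
    if c = ';' then false
    else if c = ' ' then
      if pvBlockedB.contains word then false else pvScanB [] rest
    else pvScanB (word ++ [c]) rest

def is_safe_select_py_alt (sql : String) : Bool :=
  let lowered := PySem.Chars.strip (PySem.Chars.lower sql.toList)
  if !(PySem.Chars.startswith lowered ['s','e','l','e','c','t']) then false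
  else pvScanB [] lowered

-- ===== PRECONDITION & SPEC =====
def Spec_is_safe_select_py (sql : String) (out : Bool) : Prop := out = is_safe_select_py_alt sql
instance (sql : String) (out : Bool) : Decidable (Spec_is_safe_select_py sql out) := by unfold Spec_is_safe_select_py; infer_instance

-- ===== CLAIM (what is proved, stated in full; the proofs are below) =====
def Claim_equal_is_safe_select_py : Prop := ∀ (sql : String), Dom_is_safe_select_py sql → Spec_is_safe_select_py sql (is_safe_select_py sql)

-- ===== LEMMAS AND PROOFS =====

/-- Mathematical single-space split (proof device characterising both programs). -/
def pvSplit1 : List Char → List (List Char)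
  | [] => [[]]
  | c :: rest =>
    if c = ' ' then [] :: pvSplit1 rest
    else match pvSplit1 rest with
      | [] => [[c]]
      | t :: ts => (c :: t) :: ts

theorem pvSplit1_ne_nil (s : List Char) : pvSplit1 s ≠ [] := by
  cases s with
  | nil => simp [pvSplit1]
  | cons c rest =>
    simp only [pvSplit1]
    split_ifs
    · simp
    · cases h : pvSplit1 rest <;> simp

theorem pvSplit1_cons_head_tail (s : List Char) :
    pvSplit1 s = (pvSplit1 s).headI :: (pvSplit1 s).tail := by
  cases h : pvSplit1 s with
  | nil => exact absurd h (pvSplit1_ne_nil s)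
  | cons t ts => rfl

/-- `w ++ " "` is a prefix of `s ++ " "` iff space-free `w` is the first token of `s`. -/
theorem pv_pref_iff : ∀ (w s : List Char), ' ' ∉ w →
    ((w ++ [' ']) <+: (s ++ [' ']) ↔ w = (pvSplit1 s).headI) := by
  intro w
  induction w with
  | nil =>
    intro s _
    cases s with
    | nil => simp [pvSplit1]
    | cons c rest =>
      simp only [List.nil_append, List.cons_append, List.cons_prefix_cons, pvSplit1]
      constructor
      · rintro ⟨h, -⟩
        simp [← h]
      · intro h
        split_ifs at h with hc
        · exact ⟨hc.symm, by simp⟩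
        · rcases hs : pvSplit1 rest with _ | ⟨t, ts⟩
          · exact absurd hs (pvSplit1_ne_nil rest)
          · rw [hs] at h; simp at h
  | cons w0 w' ih =>
    intro s hsp
    have hw0 : w0 ≠ ' ' := fun h => hsp (by simp [h])
    have hsp' : ' ' ∉ w' := fun h => hsp (by simp [h])
    cases s with
    | nil =>
      simp only [List.cons_append, List.nil_append, List.cons_prefix_cons, pvSplit1]
      constructor
      · rintro ⟨h, hpre⟩
        have := hpre.length_le
        simp at this
      · intro h; simp at h
    | cons c rest =>
      simp only [List.cons_append, List.cons_prefix_cons]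
      rw [ih rest hsp']
      by_cases hc : c = ' '
      · subst hc
        simp [pvSplit1, hw0]
      · rcases hs : pvSplit1 rest with _ | ⟨t, ts⟩
        · exact absurd hs (pvSplit1_ne_nil rest)
        · rw [pvSplit1]
          simp only [if_neg hc, hs, List.headI_cons, List.cons.injEq]

/-- Occurrences of `" w "` strictly inside `s ++ " "` are the non-first tokens. -/
theorem pv_tail_iff : ∀ (s w : List Char), w ≠ [] → ' ' ∉ w →
    ((' ' :: (w ++ [' '])) <:+: (s ++ [' ']) ↔ w ∈ (pvSplit1 s).tail) := by
  intro s
  induction s with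
  | nil =>
    intro w hw _
    constructor
    · intro h
      have := h.length_le
      simp at this
    · intro h; simp [pvSplit1] at h
  | cons c rest ih =>
    intro w hw hsp
    rw [List.cons_append, List.infix_cons_iff, ih w hw hsp]
    constructor
    · rintro (hpre | htail)
      · rw [List.cons_prefix_cons] at hpre
        obtain ⟨hc, hpre⟩ := hpre
        rw [pv_pref_iff w rest hsp] at hpre
        subst hc
        rw [pvSplit1]
        rw [pvSplit1_cons_head_tail rest, ← hpre]
        simp
      · by_cases hc : c = ' '
        · subst hc
          rw [pvSplit1]
          rw [pvSplit1_cons_head_tail rest]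
          simp [htail]
        · rcases hs : pvSplit1 rest with _ | ⟨t, ts⟩
          · exact absurd hs (pvSplit1_ne_nil rest)
          · rw [pvSplit1]
            simp only [if_neg hc, hs, List.tail_cons]
            simpa [hs] using htail
    · intro h
      by_cases hc : c = ' '
      · subst hc
        rw [pvSplit1] at h
        rw [pvSplit1_cons_head_tail rest] at h
        rcases List.mem_cons.mp h with h | h
        · exact Or.inl (List.cons_prefix_cons.mpr ⟨rfl, (pv_pref_iff w rest hsp).mpr h⟩)
        · exact Or.inr h
      · rcases hs : pvSplit1 rest with _ | ⟨t, ts⟩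
        · exact absurd hs (pvSplit1_ne_nil rest)
        · rw [pvSplit1] at h
          simp only [if_neg hc, hs, List.tail_cons] at h
          right
          simpa [hs] using h

/-- Main A-side fact: `" w "` occurs in `" s "` iff `w` is a single-space token of `s`. -/
theorem pv_token_iff (w s : List Char) (hw : w ≠ []) (hsp : ' ' ∉ w) :
    ((' ' :: (w ++ [' '])) <:+: (' ' :: (s ++ [' ']))) ↔ w ∈ pvSplit1 s := by
  rw [List.infix_cons_iff, List.cons_prefix_cons, pv_pref_iff w s hsp,
    pv_tail_iff s w hw hsp, pvSplit1_cons_head_tail s]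
  simp

theorem pv_singleton_infix {c : Char} {l : List Char} : [c] <:+: l ↔ c ∈ l := by
  constructor
  · intro h
    exact List.singleton_sublist.mp h.sublist
  · intro h
    obtain ⟨u, v, rfl⟩ := List.append_of_mem h
    exact ⟨u, v, by simp⟩

theorem pv_key (w l : List Char) (hw : w ≠ []) (hsp : ' ' ∉ w) :
    PySem.Chars.isIn (' ' :: (w ++ [' '])) (' ' :: (l ++ [' '])) =
      decide (w ∈ pvSplit1 l) := by
  rw [Bool.eq_iff_iff]
  simp [PySem.Chars.isIn_iff_infix, pv_token_iff w l hw hsp]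

theorem pv_semi (l : List Char) :
    PySem.Chars.isIn [';'] (' ' :: (l ++ [' '])) = decide (';' ∈ l) := by
  rw [Bool.eq_iff_iff]
  simp [PySem.Chars.isIn_iff_infix, pv_singleton_infix]

/-- The blocked-keyword list (proof device; `pvBlockedB = PySem.Set.ofList pvL11`). -/
def pvL11 : List (List Char) :=
  [ ['i','n','s','e','r','t'], ['u','p','d','a','t','e'], ['d','e','l','e','t','e'],
    ['d','r','o','p'], ['a','l','t','e','r'], ['t','r','u','n','c','a','t','e'],
    ['c','r','e','a','t','e'], ['g','r','a','n','t'], ['r','e','v','o','k','e'],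
    ['e','x','e','c','u','t','e'], ['c','a','l','l'] ]

theorem pvBlockedB_eq : pvBlockedB = pvL11 := by decide

/-- Loop invariant: the scan accepts iff no semicolon remains and neither the pending `word`
extended by the first remaining token nor any later token is blocked. -/
theorem pvScanB_iff : ∀ (l word : List Char),
    pvScanB word l = true ↔
      (';' ∉ l ∧ (word ++ (pvSplit1 l).headI) ∉ pvL11 ∧
        ∀ t ∈ (pvSplit1 l).tail, t ∉ pvL11) := by
  intro l
  induction l with
  | nil =>
    intro word
    simp [pvScanB, pvSplit1, pvBlockedB_eq, PySem.Set.contains_iff]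
  | cons c rest ih =>
    intro word
    by_cases hc : c = ';'
    · subst hc
      simp [pvScanB]
    · by_cases hsp : c = ' '
      · subst hsp
        rw [pvSplit1, if_pos rfl]
        by_cases hb : (word : List Char) ∈ pvL11
        · simp [pvScanB, pvBlockedB_eq, PySem.Set.contains_iff, hb]
        · rw [show pvScanB word (' ' :: rest) = pvScanB [] rest by
            simp [pvScanB, pvBlockedB_eq, PySem.Set.contains_iff, hb]]
          rw [ih []]
          rw [pvSplit1_cons_head_tail rest]
          simp only [List.mem_cons, List.nil_append, List.tail_cons, List.headI_cons,
            List.append_nil]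
          constructor
          · rintro ⟨h1, h2, h3⟩
            refine ⟨by simp [h1], hb, ?_⟩
            rintro t (rfl | ht)
            · exact h2
            · exact h3 t ht
          · rintro ⟨h1, -, h3⟩
            exact ⟨fun hm => h1 (by simp [hm]), h3 _ (Or.inl rfl),
              fun t ht => h3 t (Or.inr ht)⟩
      · rw [pvSplit1, if_neg hsp]
        rcases hs : pvSplit1 rest with _ | ⟨t, ts⟩
        · exact absurd hs (pvSplit1_ne_nil rest)
        · rw [show pvScanB word (c :: rest) = pvScanB (word ++ [c]) rest by
            simp [pvScanB, hc, hsp]]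
          rw [ih (word ++ [c]), hs]
          simp only [List.headI_cons, List.tail_cons, List.append_assoc, List.cons_append,
            List.nil_append, List.mem_cons]
          constructor
          · rintro ⟨h1, h2, h3⟩
            exact ⟨fun hm => hm.elim (fun h => hc h.symm) h1, h2, h3⟩
          · rintro ⟨h1, h2, h3⟩
            exact ⟨fun hm => h1 (Or.inr hm), h2, h3⟩

/-- A's keyword loop, characterised over the single-space tokens. -/
theorem pvA_iff (l : List Char) :
    ([ [' ','i','n','s','e','r','t',' '], [' ','u','p','d','a','t','e',' '],
        [' ','d','e','l','e','t','e',' '], [' ','d','r','o','p',' '],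
        [' ','a','l','t','e','r',' '], [' ','t','r','u','n','c','a','t','e',' '],
        [' ','c','r','e','a','t','e',' '], [' ','g','r','a','n','t',' '],
        [' ','r','e','v','o','k','e',' '], [' ','e','x','e','c','u','t','e',' '],
        [' ','c','a','l','l',' '], [[';'].headI] ] : List (List Char)).all
        (fun token => !(PySem.Chars.isIn token (' ' :: l ++ [' ']))) = true ↔
      ((∀ w ∈ pvL11, w ∉ pvSplit1 l) ∧ ';' ∉ l) := by
  have h1 := pv_key ['i','n','s','e','r','t'] l (by simp) (by decide)
  have h2 := pv_key ['u','p','d','a','t','e'] l (by simp) (by decide)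
  have h3 := pv_key ['d','e','l','e','t','e'] l (by simp) (by decide)
  have h4 := pv_key ['d','r','o','p'] l (by simp) (by decide)
  have h5 := pv_key ['a','l','t','e','r'] l (by simp) (by decide)
  have h6 := pv_key ['t','r','u','n','c','a','t','e'] l (by simp) (by decide)
  have h7 := pv_key ['c','r','e','a','t','e'] l (by simp) (by decide)
  have h8 := pv_key ['g','r','a','n','t'] l (by simp) (by decide)
  have h9 := pv_key ['r','e','v','o','k','e'] l (by simp) (by decide)
  have h10 := pv_key ['e','x','e','c','u','t','e'] l (by simp) (by decide)
  have h11 := pv_key ['c','a','l','l'] l (by simp) (by decide)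
  have hsemi := pv_semi l
  simp only [List.cons_append, List.nil_append] at h1 h2 h3 h4 h5 h6 h7 h8 h9 h10 h11 hsemi
  simp only [List.all_cons, List.all_nil, List.cons_append, List.headI_cons, List.nil_append,
    h1, h2, h3, h4, h5, h6, h7, h8, h9, h10, h11, hsemi,
    Bool.and_eq_true, Bool.not_eq_eq_eq_not, Bool.not_true, decide_eq_false_iff_not,
    Bool.and_true, pvL11, List.forall_mem_cons, List.forall_mem_nil, and_true]
  tauto

-- ===== VERDICT (by name: the statement is the Claim_ definition above) =====
theorem is_safe_select_py_spec : Claim_equal_is_safe_select_py := by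
  intro sql _
  unfold Spec_is_safe_select_py is_safe_select_py is_safe_select_py_alt
  set l := PySem.Chars.strip (PySem.Chars.lower sql.toList) with hl
  by_cases hsel : PySem.Chars.startswith l ['s','e','l','e','c','t'] = true
  · simp only [hsel, Bool.not_true, Bool.false_eq_true, if_false]
    rw [Bool.eq_iff_iff]
    have hA := pvA_iff l
    simp only [List.headI_cons] at hA
    rw [hA, pvScanB_iff l []]
    rw [pvSplit1_cons_head_tail l]
    simp only [List.nil_append, List.mem_cons, List.tail_cons, List.headI_cons]
    constructor
    · rintro ⟨hdisj, hsc⟩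
      refine ⟨hsc, fun hm => hdisj _ hm (Or.inl rfl), fun t ht hm => hdisj _ hm (Or.inr ht)⟩
    · rintro ⟨hsc, hh, htl⟩
      refine ⟨fun w hw hmem => ?_, hsc⟩
      rcases hmem with rfl | hmem
      · exact hh hw
      · exact htl w hmem hw
  · simp [hsel]
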